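-- pv_equiv track=rewrite | github.com/ahmadhossam03/ClickSafe | File-Scanner/Analyze-Dump.py | analyze_output_summary
-- ===== SOURCE A (Python) =====
-- def analyze_output_summary(output_text):
--     """
--     Analyzes the output of main() function and returns counts of malicious/suspicious indicators
--
--     Args:
--         output_text: String output from main() function
--
--     Returns:
--         String with summary counts
--     """
--     lines = output_text.split('\n')
--
--     # Initialize counters
--     malicious_execs_dlls = 0
--     malicious_ips = 0
--     suspicious_ips = 0
--     dangerous_terms_count = 0
--
--     # Track which section we're currently in
--     current_section = None
--
--     for line in lines:
--         line = line.strip()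
--
--         # Check for section headers
--         if line.startswith("--- ") and line.endswith(" ---"):
--             section_name = line[4:-4].lower()  # Remove "--- " and " ---"
--             current_section = section_name
--             continue
--
--         # Skip empty lines and non-item lines
--         if not line.startswith("- "):
--             continue
--
--         # Remove the "- " prefix to get the actual content
--         content = line[2:]
--
--         # Count based on current section
--         if current_section == "executables and dlls":
--             if "malicious" in content.lower():
--                 malicious_execs_dlls += 1
--         elif current_section == "ip addresses":
--             if "malicious" in content.lower():
--                 malicious_ips += 1
--             elif "suspicious" in content.lower():
--                 suspicious_ips += 1
--         elif current_section == "dangerous terms":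
--             dangerous_terms_count += 1
--
--     # Create summary text
--     summary = f"""Security Analysis Summary:
-- - Malicious Executables/DLLs: {malicious_execs_dlls}
-- - Malicious IP Addresses: {malicious_ips}
-- - Suspicious IP Addresses: {suspicious_ips}
-- - Dangerous Terms Found: {dangerous_terms_count}"""
--
--     return summary
-- ===== SOURCE B (Python) =====
-- def analyze_output_summary(output_text):
--     # Two-pass: tag each "- " item with its enclosing section, then count with generators.
--     tagged = []
--     section = None
--     for raw in output_text.split('\n'):
--         line = raw.strip()
--         if line.startswith("--- ") and line.endswith(" ---"):
--             section = line[4:-4].lower()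
--         elif line.startswith("- "):
--             tagged.append((section, line[2:]))
--     malicious_execs_dlls = sum(1 for s, c in tagged
--                                if s == "executables and dlls" and "malicious" in c.lower())
--     malicious_ips = sum(1 for s, c in tagged
--                         if s == "ip addresses" and "malicious" in c.lower())
--     suspicious_ips = sum(1 for s, c in tagged
--                          if s == "ip addresses" and "malicious" not in c.lower()
--                          and "suspicious" in c.lower())
--     dangerous_terms_count = sum(1 for s, c in tagged if s == "dangerous terms")
--     return f"""Security Analysis Summary:
-- - Malicious Executables/DLLs: {malicious_execs_dlls}
-- - Malicious IP Addresses: {malicious_ips}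
-- - Suspicious IP Addresses: {suspicious_ips}
-- - Dangerous Terms Found: {dangerous_terms_count}"""
-- ===== Notes on version B (the rewrite author's own statement) =====
-- stated objective: alternative
-- what changed: A keeps four running counters and the current section in one stateful pass; B first builds a list of (section, item) tags in one pass and then computes each of the four counts by a separate count over that tagged list.
import Mathlib
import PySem

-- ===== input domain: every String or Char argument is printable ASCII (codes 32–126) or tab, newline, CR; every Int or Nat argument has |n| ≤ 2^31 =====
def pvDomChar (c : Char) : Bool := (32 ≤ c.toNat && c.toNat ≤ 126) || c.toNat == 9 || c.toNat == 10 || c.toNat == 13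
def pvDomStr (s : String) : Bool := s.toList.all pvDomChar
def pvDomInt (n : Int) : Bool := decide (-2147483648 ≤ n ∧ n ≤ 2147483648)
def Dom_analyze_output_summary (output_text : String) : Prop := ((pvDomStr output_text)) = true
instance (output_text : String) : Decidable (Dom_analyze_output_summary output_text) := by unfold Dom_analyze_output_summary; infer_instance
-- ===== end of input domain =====

-- B replaces A's single pass with running counters by two passes: tag each "- " item with its enclosing section, then count the four categories over the tagged list (objective: alternative decomposition, same cost).


-- ===== PORT A =====
-- the fixed strings both programs test against
def pvHdrPre : List Char := "--- ".toList
def pvHdrSuf : List Char := " ---".toList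
def pvDash : List Char := "- ".toList
def pvExe : List Char := "executables and dlls".toList
def pvIp : List Char := "ip addresses".toList
def pvDt : List Char := "dangerous terms".toList
def pvMal : List Char := "malicious".toList
def pvSus : List Char := "suspicious".toList

-- A: one pass over the lines keeping the current section and four running counters
def pvStepA (st : Option (List Char) × Int × Int × Int × Int) (raw : List Char) :
    Option (List Char) × Int × Int × Int × Int :=
  let line := PySem.Chars.strip raw
  if PySem.Chars.startswith line pvHdrPre && PySem.Chars.endswith line pvHdrSuf then
    (some (PySem.Chars.lower (PySem.List.slice line (some 4) (some (-4)))), st.2)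
  else if !(PySem.Chars.startswith line pvDash) then st
  else
    let content := PySem.List.slice line (some 2) none
    match st with
    | (sec, m1, m2, s3, d4) =>
      if sec = some pvExe then
        if PySem.Chars.isIn pvMal (PySem.Chars.lower content) then
          (sec, m1 + 1, m2, s3, d4)
        else (sec, m1, m2, s3, d4)
      else if sec = some pvIp then
        if PySem.Chars.isIn pvMal (PySem.Chars.lower content) then
          (sec, m1, m2 + 1, s3, d4)
        else if PySem.Chars.isIn pvSus (PySem.Chars.lower content) then
          (sec, m1, m2, s3 + 1, d4)
        else (sec, m1, m2, s3, d4)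
      else if sec = some pvDt then
        (sec, m1, m2, s3, d4 + 1)
      else (sec, m1, m2, s3, d4)

-- the final f-string (identical in A and B)
def pvFormat (a b c d : Int) : String :=
  String.ofList ("Security Analysis Summary:\n- Malicious Executables/DLLs: ".toList
    ++ PySem.Int.toChars a ++ "\n- Malicious IP Addresses: ".toList
    ++ PySem.Int.toChars b ++ "\n- Suspicious IP Addresses: ".toList
    ++ PySem.Int.toChars c ++ "\n- Dangerous Terms Found: ".toList
    ++ PySem.Int.toChars d)

def analyze_output_summary (output_text : String) : String :=
  let lines := PySem.Chars.splitOn output_text.toList ['\n']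
  let r := lines.foldl pvStepA (none, 0, 0, 0, 0)
  pvFormat r.2.1 r.2.2.1 r.2.2.2.1 r.2.2.2.2

-- ===== PORT B =====
-- B pass 1: tag each "- " item with its enclosing section
def pvStepB (st : Option (List Char) × List (Option (List Char) × List Char)) (raw : List Char) :
    Option (List Char) × List (Option (List Char) × List Char) :=
  let line := PySem.Chars.strip raw
  if PySem.Chars.startswith line pvHdrPre && PySem.Chars.endswith line pvHdrSuf then
    (some (PySem.Chars.lower (PySem.List.slice line (some 4) (some (-4)))), st.2)
  else if PySem.Chars.startswith line pvDash then
    (st.1, st.2 ++ [(st.1, PySem.List.slice line (some 2) none)])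
  else st

-- B pass 2: the four counting predicates (one per generator in Source B)
def pvIsME (sc : Option (List Char) × List Char) : Bool :=
  sc.1 = some pvExe && PySem.Chars.isIn pvMal (PySem.Chars.lower sc.2)
def pvIsMI (sc : Option (List Char) × List Char) : Bool :=
  sc.1 = some pvIp && PySem.Chars.isIn pvMal (PySem.Chars.lower sc.2)
def pvIsSI (sc : Option (List Char) × List Char) : Bool :=
  sc.1 = some pvIp && !PySem.Chars.isIn pvMal (PySem.Chars.lower sc.2) &&
    PySem.Chars.isIn pvSus (PySem.Chars.lower sc.2)
def pvIsDT (sc : Option (List Char) × List Char) : Bool :=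
  sc.1 = some pvDt

def analyze_output_summary_alt (output_text : String) : String :=
  let lines := PySem.Chars.splitOn output_text.toList ['\n']
  let tagged := (lines.foldl pvStepB (none, [])).2
  pvFormat (tagged.countP pvIsME : Int) (tagged.countP pvIsMI : Int)
           (tagged.countP pvIsSI : Int) (tagged.countP pvIsDT : Int)

-- ===== PRECONDITION & SPEC =====
def Spec_analyze_output_summary (output_text : String) (out : String) : Prop := out = analyze_output_summary_alt output_text
instance (output_text : String) (out : String) : Decidable (Spec_analyze_output_summary output_text out) := by unfold Spec_analyze_output_summary; infer_instance

-- ===== CLAIM (what is proved, stated in full; the proofs are below) =====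
def Claim_equal_analyze_output_summary : Prop := ∀ (output_text : String), Dom_analyze_output_summary output_text → Spec_analyze_output_summary output_text (analyze_output_summary output_text)

-- ===== LEMMAS AND PROOFS =====

theorem pvExe_ne_pvIp : pvExe ≠ pvIp := by decide
theorem pvExe_ne_pvDt : pvExe ≠ pvDt := by decide
theorem pvIp_ne_pvDt : pvIp ≠ pvDt := by decide

-- B's accumulator splits off: the tagged list from (sec, acc) is acc ++ (tagged from (sec, []))
theorem pvStepB_acc (lines : List (List Char)) (sec : Option (List Char))
    (acc : List (Option (List Char) × List Char)) :
    lines.foldl pvStepB (sec, acc) =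
      ((lines.foldl pvStepB (sec, [])).1, acc ++ (lines.foldl pvStepB (sec, [])).2) := by
  induction lines generalizing sec acc with
  | nil => simp
  | cons l ls ih =>
    simp only [List.foldl_cons]
    by_cases h1 : (PySem.Chars.startswith (PySem.Chars.strip l) pvHdrPre &&
        PySem.Chars.endswith (PySem.Chars.strip l) pvHdrSuf) = true
    · simp only [pvStepB, h1, if_pos]
      exact ih _ _
    · rw [Bool.not_eq_true] at h1
      by_cases h2 : PySem.Chars.startswith (PySem.Chars.strip l) pvDash = true
      · simp only [pvStepB, h1, h2, Bool.false_eq_true, if_false, if_true]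
        rw [ih sec ([] ++ [(sec, PySem.List.slice (PySem.Chars.strip l) (some 2) none)]),
            ih sec (acc ++ [(sec, PySem.List.slice (PySem.Chars.strip l) (some 2) none)])]
        simp
      · rw [Bool.not_eq_true] at h2
        simp only [pvStepB, h1, h2, Bool.false_eq_true, if_false]
        exact ih _ _

-- Main invariant: A's counters over any suffix are the start counters plus B's counts of the tags
theorem pvMain (lines : List (List Char)) (sec : Option (List Char)) (m1 m2 s3 d4 : Int) :
    lines.foldl pvStepA (sec, m1, m2, s3, d4) =
      ((lines.foldl pvStepB (sec, [])).1,
       m1 + ((lines.foldl pvStepB (sec, [])).2.countP pvIsME : Int),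
       m2 + ((lines.foldl pvStepB (sec, [])).2.countP pvIsMI : Int),
       s3 + ((lines.foldl pvStepB (sec, [])).2.countP pvIsSI : Int),
       d4 + ((lines.foldl pvStepB (sec, [])).2.countP pvIsDT : Int)) := by
  induction lines generalizing sec m1 m2 s3 d4 with
  | nil => simp
  | cons l ls ih =>
    simp only [List.foldl_cons]
    by_cases h1 : (PySem.Chars.startswith (PySem.Chars.strip l) pvHdrPre &&
        PySem.Chars.endswith (PySem.Chars.strip l) pvHdrSuf) = true
    · simp only [pvStepA, pvStepB, h1, if_pos]
      exact ih _ _ _ _ _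
    · rw [Bool.not_eq_true] at h1
      by_cases h2 : PySem.Chars.startswith (PySem.Chars.strip l) pvDash = true
      · simp only [pvStepA, pvStepB, h1, h2, Bool.not_true, Bool.false_eq_true, if_false, if_true]
        rw [pvStepB_acc ls sec ([] ++ [(sec, PySem.List.slice (PySem.Chars.strip l) (some 2) none)])]
        set c := PySem.List.slice (PySem.Chars.strip l) (some 2) none with hc
        by_cases e1 : sec = some pvExe
        · subst e1
          by_cases hm : PySem.Chars.isIn pvMal (PySem.Chars.lower c) = true
          · simp [hm, ih, pvIsME, pvIsMI, pvIsSI, pvIsDT, pvExe_ne_pvIp, pvExe_ne_pvDt]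
            ring
          · rw [Bool.not_eq_true] at hm
            simp [hm, ih, pvIsME, pvIsMI, pvIsSI, pvIsDT, pvExe_ne_pvIp, pvExe_ne_pvDt]
        · by_cases e2 : sec = some pvIp
          · subst e2
            by_cases hm : PySem.Chars.isIn pvMal (PySem.Chars.lower c) = true
            · simp [e1, hm, ih, pvIsME, pvIsMI, pvIsSI, pvIsDT, pvIp_ne_pvDt]
              ring
            · rw [Bool.not_eq_true] at hm
              by_cases hs : PySem.Chars.isIn pvSus (PySem.Chars.lower c) = true
              · simp [e1, hm, hs, ih, pvIsME, pvIsMI, pvIsSI, pvIsDT, pvIp_ne_pvDt]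
                ring
              · rw [Bool.not_eq_true] at hs
                simp [e1, hm, hs, ih, pvIsME, pvIsMI, pvIsSI, pvIsDT, pvIp_ne_pvDt]
          · by_cases e3 : sec = some pvDt
            · subst e3
              simp [e1, e2, ih, pvIsME, pvIsMI, pvIsSI, pvIsDT]
              ring
            · simp [e1, e2, e3, ih, pvIsME, pvIsMI, pvIsSI, pvIsDT]
      · rw [Bool.not_eq_true] at h2
        simp only [pvStepA, pvStepB, h1, h2, Bool.not_false, Bool.false_eq_true, if_false, if_true]
        exact ih _ _ _ _ _

-- ===== VERDICT =====
theorem analyze_output_summary_spec : Claim_equal_analyze_output_summary := by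
  intro s _
  unfold Spec_analyze_output_summary analyze_output_summary analyze_output_summary_alt
  simp [pvMain]
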